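-- pv_equiv track=rewrite | github.com/pranaovs/college-notes | Semester-2/CS1002-Programming_in_Python/Practice/04-Lists/13-Element_Repetition.py | get_common_indices
-- ===== SOURCE A (Python) =====
-- def get_common_indices(lists):
--     if not lists:
--         return []
--
--     common_indices = []
--     for i in range(len(lists[0])):
--         element = lists[0][i]
--         if all(i < len(lst) and lst[i] == element for lst in lists):
--             common_indices.append(i)
--     return common_indices
-- ===== SOURCE B (Python) =====
-- def get_common_indices(lists):
--     if not lists:
--         return []
--     first = lists[0]
--     candidates = list(range(len(first)))
--     for lst in lists[1:]:
--         candidates = [i for i in candidates if i < len(lst) and lst[i] == first[i]]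
--         if not candidates:
--             break
--     return candidates
-- ===== Notes on version B (the rewrite author's own statement) =====
-- stated objective: alternative
-- what changed: B loops over the remaining lists, maintaining a shrinking candidate-index list that each list filters (with early exit once empty), instead of A's loop over indices that scans all lists per index.
import Mathlib
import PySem

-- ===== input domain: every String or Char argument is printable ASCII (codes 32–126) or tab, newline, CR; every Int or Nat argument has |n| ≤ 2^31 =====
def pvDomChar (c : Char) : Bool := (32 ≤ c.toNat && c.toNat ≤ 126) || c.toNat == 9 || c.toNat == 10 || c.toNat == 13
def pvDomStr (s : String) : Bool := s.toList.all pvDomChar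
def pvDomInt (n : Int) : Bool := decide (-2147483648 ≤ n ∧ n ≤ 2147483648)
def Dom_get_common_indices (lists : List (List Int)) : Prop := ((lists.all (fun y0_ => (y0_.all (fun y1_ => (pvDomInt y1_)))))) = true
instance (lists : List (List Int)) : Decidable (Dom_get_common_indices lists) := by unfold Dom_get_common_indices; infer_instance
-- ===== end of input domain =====

-- B loops over the remaining lists, shrinking a candidate-index list (with early exit when it
-- becomes empty) instead of A's loop over indices scanning all lists per index (objective: alternative).

-- ===== PORT A =====
def get_common_indices (lists : List (List Int)) : List Int :=
  match lists with
  | [] => []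
  | l0 :: rest =>
    (PySem.List.pyRange 0 (l0.length : Int) 1).foldl
      (fun acc i =>
        let element := PySem.List.pyGetD l0 i 0
        if (l0 :: rest).all
            (fun lst => decide (i < (lst.length : Int)) && (PySem.List.pyGetD lst i 0 == element))
        then acc ++ [i] else acc) []

-- ===== PORT B =====
-- 'i < len(lst) and lst[i] == first[i]' for one candidate index i and one list lst
def keepIdx (first lst : List Int) (i : Int) : Bool :=
  decide (i < (lst.length : Int)) && (PySem.List.pyGetD lst i 0 == PySem.List.pyGetD first i 0)

-- the 'for lst in lists[1:]' loop with the 'if not candidates: break' early exit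
def shrinkCands (first : List Int) : List Int → List (List Int) → List Int
  | cands, [] => cands
  | cands, lst :: rest =>
    let c' := cands.filter (keepIdx first lst)
    if c'.isEmpty then c' else shrinkCands first c' rest

def get_common_indices_alt (lists : List (List Int)) : List Int :=
  match lists with
  | [] => []
  | first :: rest => shrinkCands first (PySem.List.pyRange 0 (first.length : Int) 1) rest

-- ===== PRECONDITION & SPEC =====
def Spec_get_common_indices (lists : List (List Int)) (out : List Int) : Prop := out = get_common_indices_alt lists
instance (lists : List (List Int)) (out : List Int) : Decidable (Spec_get_common_indices lists out) := by unfold Spec_get_common_indices; infer_instance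

-- ===== CLAIM (what is proved, stated in full; the proofs are below) =====
def Claim_equal_get_common_indices : Prop := ∀ (lists : List (List Int)), Dom_get_common_indices lists → Spec_get_common_indices lists (get_common_indices lists)

-- ===== LEMMAS AND PROOFS =====

theorem foldl_filter_nil (first : List Int) (rows : List (List Int)) :
    rows.foldl (fun c l => c.filter (keepIdx first l)) [] = [] := by
  induction rows with
  | nil => rfl
  | cons l ls ih => simpa using ih

-- the early exit is harmless: shrinkCands is the plain foldl of filters
theorem shrink_eq_foldl (first : List Int) :
    ∀ (rows : List (List Int)) (cands : List Int),
      shrinkCands first cands rows = rows.foldl (fun c l => c.filter (keepIdx first l)) cands := by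
  intro rows
  induction rows with
  | nil => intro c; rfl
  | cons l ls ih =>
    intro c
    show (if (c.filter (keepIdx first l)).isEmpty then c.filter (keepIdx first l)
          else shrinkCands first (c.filter (keepIdx first l)) ls) = _
    by_cases h : (c.filter (keepIdx first l)).isEmpty
    · rw [if_pos h, List.foldl_cons, List.isEmpty_iff.mp h, foldl_filter_nil]
    · rw [if_neg h, List.foldl_cons, ih]

-- successive filters = one filter by the conjunction over rows
theorem foldl_filter_eq (first : List Int) :
    ∀ (rows : List (List Int)) (cands : List Int),
      rows.foldl (fun c l => c.filter (keepIdx first l)) cands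
        = cands.filter (fun i => rows.all (fun l => keepIdx first l i)) := by
  intro rows
  induction rows with
  | nil => intro c; simp
  | cons l ls ih =>
    intro c
    rw [List.foldl_cons, ih, List.filter_filter]
    apply List.filter_congr
    intro i _
    simp [Bool.and_comm]

-- ===== VERDICT (by name: the statement is the Claim_ definition above) =====
theorem get_common_indices_spec : Claim_equal_get_common_indices := by
  intro lists _
  show get_common_indices lists = get_common_indices_alt lists
  cases lists with
  | nil => rfl
  | cons l0 rest =>
    show (PySem.List.pyRange 0 (l0.length : Int) 1).foldl _ [] =
      shrinkCands l0 (PySem.List.pyRange 0 (l0.length : Int) 1) rest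
    rw [shrink_eq_foldl, foldl_filter_eq, PySem.List.foldl_append_if_eq_filter, List.nil_append,
      PySem.List.pyRange_zero_nat]
    apply List.filter_congr
    intro i hi
    obtain ⟨k, hk, rfl⟩ := List.mem_map.mp hi
    have hk' : k < l0.length := List.mem_range.mp hk
    simp [keepIdx, hk']
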